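-- pv_equiv track=rewrite | github.com/valeriynasonov/Testcase | Tasks/tasks1/task1.py | ordering_info
-- ===== SOURCE A (Python) =====
-- def ordering_info(info):
--
--     clients = {}
--
--     for n in range(0, len(info)):
--         client = f'{info[n][2]} {info[n][3]}'
--         if clients.get(client) is None:
--             clients[client] = f'{info[n][0]} - {info[n][1]}'
--         elif clients.get(client):
--             a = clients.get(client) + " " + f'{info[n][0]} - {info[n][1]}'
--             clients[client] = a
--     for k, v in clients.items():
--         gen_inform = k + ":" + " " + v
--         return gen_inform
-- ===== SOURCE B (Python) =====
-- def ordering_info(info):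
--     if not info:
--         return None
--     first = info[0]
--     target = f'{first[2]} {first[3]}'
--     result = f'{first[0]} - {first[1]}'
--     for row in info[1:]:
--         if f'{row[2]} {row[3]}' == target:
--             result += " " + f'{row[0]} - {row[1]}'
--     return target + ": " + result
-- ===== Notes on version B (the rewrite author's own statement) =====
-- stated objective: simpler
-- what changed: B drops the grouping dict and the items() scan entirely: it takes the first row's client as the target and accumulates that one client's order string in a single pass over the remaining rows.
import Mathlib
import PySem

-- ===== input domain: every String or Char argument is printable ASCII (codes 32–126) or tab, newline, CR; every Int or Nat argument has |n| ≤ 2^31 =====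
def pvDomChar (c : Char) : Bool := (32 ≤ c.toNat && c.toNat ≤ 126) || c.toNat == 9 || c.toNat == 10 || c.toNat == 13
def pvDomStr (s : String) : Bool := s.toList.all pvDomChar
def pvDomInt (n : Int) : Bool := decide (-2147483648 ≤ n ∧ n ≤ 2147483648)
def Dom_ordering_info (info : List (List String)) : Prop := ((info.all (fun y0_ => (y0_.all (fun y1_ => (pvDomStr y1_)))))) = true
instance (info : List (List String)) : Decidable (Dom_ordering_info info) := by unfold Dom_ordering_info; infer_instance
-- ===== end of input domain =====

-- B drops the grouping dict and the second loop: it builds only the FIRST row's client string in one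
-- pass (objective: simpler). Pre_ excludes rows shorter than 4 fields, on which Python A raises IndexError.

-- ===== PORT A =====
-- literal port of A: index loop over range(0, len(info)), a grouping dict, then the first item of the dict.
-- Pre_ guarantees every row has ≥ 4 fields, so pyGetD with a junk default is exact (Python would raise otherwise).
def ordering_info (info : List (List String)) : Option String :=
  let clients : PySem.Dict String String :=
    (PySem.List.pyRange 0 (PySem.List.len info)).foldl (fun clients n =>
      let row := PySem.List.pyGetD info n []
      let client := PySem.List.pyGetD row 2 "" ++ " " ++ PySem.List.pyGetD row 3 ""
      match clients.get? client with
      | none => clients.insert client (PySem.List.pyGetD row 0 "" ++ " - " ++ PySem.List.pyGetD row 1 "")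
      | some v =>
        if v ≠ "" then
          clients.insert client (v ++ " " ++ (PySem.List.pyGetD row 0 "" ++ " - " ++ PySem.List.pyGetD row 1 ""))
        else clients) PySem.Dict.empty
  match clients.items with
  | [] => none
  | (k, v) :: _ => some (k ++ ":" ++ " " ++ v)

-- ===== PORT B =====
def ordering_info_alt (info : List (List String)) : Option String :=
  match info with
  | [] => none
  | first :: rest =>
    let target := PySem.List.pyGetD first 2 "" ++ " " ++ PySem.List.pyGetD first 3 ""
    let result := rest.foldl (fun res row =>
      if (PySem.List.pyGetD row 2 "" ++ " " ++ PySem.List.pyGetD row 3 "") = target then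
        res ++ " " ++ (PySem.List.pyGetD row 0 "" ++ " - " ++ PySem.List.pyGetD row 1 "")
      else res)
      (PySem.List.pyGetD first 0 "" ++ " - " ++ PySem.List.pyGetD first 1 "")
    some (target ++ ": " ++ result)

-- ===== PRECONDITION & SPEC =====
-- Pre_ excludes exactly the inputs on which Python A raises IndexError: a row with fewer than 4 fields.
def Pre_ordering_info (info : List (List String)) : Prop := ∀ r ∈ info, 4 ≤ r.length
instance (info : List (List String)) : Decidable (Pre_ordering_info info) := by unfold Pre_ordering_info; infer_instance
def pvWitness_ordering_info : List (List String) :=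
  [["o1", "p1", "Jane", "Doe"], ["o2", "p2", "Jane", "Doe"], ["o3", "p3", "Kim", "Lee"]]

def Spec_ordering_info (info : List (List String)) (out : Option String) : Prop := out = ordering_info_alt info
instance (info : List (List String)) (out : Option String) : Decidable (Spec_ordering_info info out) := by unfold Spec_ordering_info; infer_instance

-- ===== CLAIM (what is proved, stated in full; the proofs are below) =====
def Claim_equal_ordering_info : Prop := ∀ (info : List (List String)), Dom_ordering_info info → Pre_ordering_info info → Spec_ordering_info info (ordering_info info)

-- ===== LEMMAS AND PROOFS =====

-- abbreviations for the two strings both programs build from a row (proof-side only)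
def rowKey (row : List String) : String :=
  PySem.List.pyGetD row 2 "" ++ " " ++ PySem.List.pyGetD row 3 ""
def rowVal (row : List String) : String :=
  PySem.List.pyGetD row 0 "" ++ " - " ++ PySem.List.pyGetD row 1 ""

def stepA (clients : PySem.Dict String String) (row : List String) : PySem.Dict String String :=
  match clients.get? (rowKey row) with
  | none => clients.insert (rowKey row) (rowVal row)
  | some v =>
    if v ≠ "" then clients.insert (rowKey row) (v ++ " " ++ rowVal row) else clients

theorem mid_append_ne_empty (a m b : String) (hm : m ≠ "") : a ++ m ++ b ≠ "" := by
  intro h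
  have h2 := congrArg String.toList h
  simp at h2
  exact hm h2.2.1

theorem rowVal_ne_empty (row : List String) : rowVal row ≠ "" := by
  apply mid_append_ne_empty; decide

-- one A-loop step preserves the invariant and updates the head value exactly as B's step does
theorem stepA_items (d : PySem.Dict String String) (row : List String) (k0 v0 : String)
    (tl : List (String × String)) (hit : d.items = (k0, v0) :: tl)
    (hnd : d.keys.Nodup) (hne : ∀ p ∈ d.items, p.2 ≠ "") :
    ∃ tl', (stepA d row).items = (k0, if rowKey row = k0 then v0 ++ " " ++ rowVal row else v0) :: tl'
      ∧ (stepA d row).keys.Nodup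
      ∧ ∀ p ∈ (stepA d row).items, p.2 ≠ "" := by
  by_cases hk : rowKey row = k0
  · -- the row belongs to the first client: its entry is overwritten in place
    subst hk
    have hmem : (rowKey row, v0) ∈ d.items := by rw [hit]; exact List.mem_cons_self
    have hget : d.get? (rowKey row) = some v0 := PySem.Dict.get?_of_mem_items d hmem hnd
    have hv0 : v0 ≠ "" := hne _ hmem
    have hcont : d.contains (rowKey row) = true := by
      rw [PySem.Dict.contains_eq_isSome_get?, hget]; rfl
    have htl : ∀ p ∈ tl, p.1 ≠ rowKey row := by
      intro p hp heq
      have hkeys : d.keys = rowKey row :: tl.map (·.1) := by simp [PySem.Dict.keys, hit]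
      rw [hkeys] at hnd
      exact (List.nodup_cons.mp hnd).1 (heq ▸ List.mem_map_of_mem hp)
    have hstep : stepA d row = d.insert (rowKey row) (v0 ++ " " ++ rowVal row) := by
      simp only [stepA, hget, hv0, ne_eq, not_false_iff, if_true]
    refine ⟨tl, ?_, ?_, ?_⟩
    · rw [if_pos rfl, hstep, PySem.Dict.items_insert_of_contains d _ hcont, hit, List.map_cons]
      simp only [beq_self_eq_true, if_true]
      congr 1
      calc List.map (fun p => if (p.1 == rowKey row) = true then (rowKey row, v0 ++ " " ++ rowVal row) else p) tl
          = List.map id tl := List.map_congr_left (by intro p hp; simp [htl p hp])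
        _ = tl := List.map_id tl
    · rw [hstep]; exact PySem.Dict.nodup_keys_insert d _ _ hnd
    · rw [hstep]
      intro p hp
      rcases (PySem.Dict.mem_items_insert _ _ _ _).mp hp with h | h
      · subst h; exact mid_append_ne_empty _ _ _ (by decide)
      · exact hne _ h.1
  · -- a different client: the head entry is untouched
    cases hget : d.get? (rowKey row) with
    | none =>
      have hcont : d.contains (rowKey row) = false := by
        rw [PySem.Dict.contains_eq_isSome_get?, hget]; rfl
      have hstep : stepA d row = d.insert (rowKey row) (rowVal row) := by
        simp only [stepA, hget]
      refine ⟨tl ++ [(rowKey row, rowVal row)], ?_, ?_, ?_⟩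
      · rw [if_neg hk, hstep, PySem.Dict.items_insert_of_not_contains d _ hcont, hit]; rfl
      · rw [hstep]; exact PySem.Dict.nodup_keys_insert d _ _ hnd
      · rw [hstep]
        intro p hp
        rcases (PySem.Dict.mem_items_insert _ _ _ _).mp hp with h | h
        · subst h; exact rowVal_ne_empty row
        · exact hne _ h.1
    | some v =>
      have hv : v ≠ "" := hne _ (PySem.Dict.mem_items_of_get?_eq_some d hget)
      have hcont : d.contains (rowKey row) = true := by
        rw [PySem.Dict.contains_eq_isSome_get?, hget]; rfl
      have hstep : stepA d row = d.insert (rowKey row) (v ++ " " ++ rowVal row) := by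
        simp only [stepA, hget, hv, ne_eq, not_false_iff, if_true]
      refine ⟨tl.map (fun p => if (p.1 == rowKey row) = true then (rowKey row, v ++ " " ++ rowVal row) else p), ?_, ?_, ?_⟩
      · rw [if_neg hk, hstep, PySem.Dict.items_insert_of_contains d _ hcont, hit, List.map_cons]
        have hk0 : (k0 == rowKey row) = false := by
          simp only [beq_eq_false_iff_ne, ne_eq]
          intro h; exact hk h.symm
        rw [hk0]; rfl
      · rw [hstep]; exact PySem.Dict.nodup_keys_insert d _ _ hnd
      · rw [hstep]
        intro p hp
        rcases (PySem.Dict.mem_items_insert _ _ _ _).mp hp with h | h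
        · subst h; exact mid_append_ne_empty _ _ _ (by decide)
        · exact hne _ h.1

-- the whole A loop: the first dict entry accumulates exactly B's single string
theorem loop_head (rows : List (List String)) (d : PySem.Dict String String)
    (k0 : String) (v0 : String) (tl : List (String × String))
    (hit : d.items = (k0, v0) :: tl) (hnd : d.keys.Nodup) (hne : ∀ p ∈ d.items, p.2 ≠ "") :
    ∃ tl', (rows.foldl stepA d).items =
      (k0, rows.foldl (fun res row => if rowKey row = k0 then res ++ " " ++ rowVal row else res) v0) :: tl' := by
  induction rows generalizing d v0 tl with
  | nil => exact ⟨tl, hit⟩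
  | cons row rows ih =>
    obtain ⟨tl', h1, h2, h3⟩ := stepA_items d row k0 v0 tl hit hnd hne
    simpa using ih (stepA d row) _ tl' h1 h2 h3

theorem ordering_info_eq_foldl (info : List (List String)) :
    ordering_info info =
      match (info.foldl stepA PySem.Dict.empty).items with
      | [] => none
      | (k, v) :: _ => some (k ++ ":" ++ " " ++ v) := by
  have h := PySem.List.foldl_pyRange_zero_pyGetD info [] stepA PySem.Dict.empty
  unfold ordering_info
  simp only [stepA, rowKey, rowVal] at h
  rw [h]

-- ===== VERDICT (by name: the statement is the Claim_ definition above) =====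
theorem ordering_info_spec : Claim_equal_ordering_info := by
  intro info _ _
  unfold Spec_ordering_info
  rw [ordering_info_eq_foldl]
  cases info with
  | nil => rfl
  | cons first rest =>
    have hstep : stepA PySem.Dict.empty first =
        PySem.Dict.empty.insert (rowKey first) (rowVal first) := by
      simp [stepA, PySem.Dict.get?_empty]
    have hit : (stepA PySem.Dict.empty first).items = [(rowKey first, rowVal first)] := by
      rw [hstep, PySem.Dict.items_insert_of_not_contains _ _ (by rfl)]
      rfl
    have hnd : (stepA PySem.Dict.empty first).keys.Nodup := by
      rw [hstep]
      exact PySem.Dict.nodup_keys_insert _ _ _ PySem.Dict.nodup_keys_empty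
    have hne : ∀ p ∈ (stepA PySem.Dict.empty first).items, p.2 ≠ "" := by
      rw [hit]; rintro p hp
      rcases List.mem_singleton.mp hp with rfl
      exact rowVal_ne_empty first
    obtain ⟨tl', hfin⟩ := loop_head rest _ (rowKey first) (rowVal first) [] hit hnd hne
    simp only [List.foldl_cons, hfin]
    unfold ordering_info_alt rowKey rowVal
    simp only [Option.some.injEq]
    have hcol : (":" ++ " " : String) = ": " := by decide
    rw [String.append_assoc (s₂ := ":") (s₃ := " "), hcol]
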